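-- pv_equiv track=rewrite | github.com/zovexl26-dot/Borsa-ai | app.py | genel_sentiment_hesapla
-- ===== SOURCE A (Python) =====
-- def genel_sentiment_hesapla(haberler):
--     olumlu = sum(1 for h in haberler if h.get("sentiment_bireysel") == "Olumlu")
--     olumsuz = sum(1 for h in haberler if h.get("sentiment_bireysel") == "Olumsuz")
--     if olumlu > olumsuz:
--         return "Olumlu"
--     elif olumsuz > olumlu:
--         return "Olumsuz"
--     return "Notr"
-- ===== SOURCE B (Python) =====
-- def genel_sentiment_hesapla(haberler):
--     net = 0
--     for h in haberler:
--         s = h.get("sentiment_bireysel")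
--         if s == "Olumlu":
--             net += 1
--         elif s == "Olumsuz":
--             net -= 1
--     if net > 0:
--         return "Olumlu"
--     if net < 0:
--         return "Olumsuz"
--     return "Notr"
-- ===== Notes on version B (the rewrite author's own statement) =====
-- stated objective: simpler
-- what changed: Replaces the two independent counting passes and count comparison with a single pass maintaining one signed net score whose sign determines the label.
import Mathlib
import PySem

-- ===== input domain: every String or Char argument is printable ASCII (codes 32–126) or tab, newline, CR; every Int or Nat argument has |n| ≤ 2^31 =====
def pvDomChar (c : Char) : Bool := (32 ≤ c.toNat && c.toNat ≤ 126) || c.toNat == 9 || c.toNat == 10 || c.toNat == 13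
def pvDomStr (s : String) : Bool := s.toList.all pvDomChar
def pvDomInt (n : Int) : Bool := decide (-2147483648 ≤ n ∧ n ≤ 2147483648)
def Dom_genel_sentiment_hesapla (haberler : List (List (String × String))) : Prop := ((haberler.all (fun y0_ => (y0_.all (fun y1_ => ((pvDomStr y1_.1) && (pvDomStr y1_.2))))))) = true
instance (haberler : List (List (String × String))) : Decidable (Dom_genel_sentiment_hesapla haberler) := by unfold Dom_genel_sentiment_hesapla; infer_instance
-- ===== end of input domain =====

-- B replaces A's two counting passes by one pass over a single signed net accumulator (objective: simpler).
-- ===== PORT A =====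
-- h.get("sentiment_bireysel") on the assoc-list dict: first match, none if absent
def pvGetSent (h : List (String × String)) : Option String := h.lookup "sentiment_bireysel"

def genel_sentiment_hesapla (haberler : List (List (String × String))) : String :=
  let olumlu : Int := haberler.foldl (fun acc h => if pvGetSent h = some "Olumlu" then acc + 1 else acc) 0
  let olumsuz : Int := haberler.foldl (fun acc h => if pvGetSent h = some "Olumsuz" then acc + 1 else acc) 0
  if olumlu > olumsuz then "Olumlu"
  else if olumsuz > olumlu then "Olumsuz"
  else "Notr"

-- ===== PORT B =====
def genel_sentiment_hesapla_alt (haberler : List (List (String × String))) : String :=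
  let net : Int := haberler.foldl (fun n h =>
    let s := h.lookup "sentiment_bireysel"
    if s = some "Olumlu" then n + 1
    else if s = some "Olumsuz" then n - 1
    else n) 0
  if net > 0 then "Olumlu"
  else if net < 0 then "Olumsuz"
  else "Notr"

-- ===== PRECONDITION & SPEC =====
def Spec_genel_sentiment_hesapla (haberler : List (List (String × String))) (out : String) : Prop := out = genel_sentiment_hesapla_alt haberler
instance (haberler : List (List (String × String))) (out : String) : Decidable (Spec_genel_sentiment_hesapla haberler out) := by unfold Spec_genel_sentiment_hesapla; infer_instance

-- ===== CLAIM (what is proved, stated in full; the proofs are below) =====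
def Claim_equal_genel_sentiment_hesapla : Prop := ∀ (haberler : List (List (String × String))), Dom_genel_sentiment_hesapla haberler → Spec_genel_sentiment_hesapla haberler (genel_sentiment_hesapla haberler)

-- ===== LEMMAS AND PROOFS =====
-- invariant: B's net fold equals the difference of A's two count folds
theorem net_eq_sub (l : List (List (String × String))) (n a b : Int) (h : n = a - b) :
    l.foldl (fun n h =>
      let s := h.lookup "sentiment_bireysel"
      if s = some "Olumlu" then n + 1
      else if s = some "Olumsuz" then n - 1
      else n) n
    = l.foldl (fun acc h => if pvGetSent h = some "Olumlu" then acc + 1 else acc) a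
      - l.foldl (fun acc h => if pvGetSent h = some "Olumsuz" then acc + 1 else acc) b := by
  induction l generalizing n a b with
  | nil => simpa using h
  | cons x xs ih =>
    simp only [List.foldl_cons]
    apply ih
    simp only [pvGetSent]
    by_cases h1 : x.lookup "sentiment_bireysel" = some "Olumlu"
    · simp [h1, h]; ring
    · by_cases h2 : x.lookup "sentiment_bireysel" = some "Olumsuz"
      · simp [h2, h]; ring
      · simp [h1, h2, h]

-- ===== VERDICT (by name: the statement is the Claim_ definition above) =====
theorem genel_sentiment_hesapla_spec : Claim_equal_genel_sentiment_hesapla := by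
  intro haberler _
  unfold Spec_genel_sentiment_hesapla genel_sentiment_hesapla genel_sentiment_hesapla_alt
  simp only []
  rw [show (haberler.foldl (fun n h =>
      let s := h.lookup "sentiment_bireysel"
      if s = some "Olumlu" then n + 1
      else if s = some "Olumsuz" then n - 1
      else n) 0 : Int)
    = haberler.foldl (fun acc h => if pvGetSent h = some "Olumlu" then acc + 1 else acc) 0
      - haberler.foldl (fun acc h => if pvGetSent h = some "Olumsuz" then acc + 1 else acc) 0
    from net_eq_sub haberler 0 0 0 (by ring)]
  set p := (haberler.foldl (fun acc h => if pvGetSent h = some "Olumlu" then acc + 1 else acc) (0:Int))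
  set q := (haberler.foldl (fun acc h => if pvGetSent h = some "Olumsuz" then acc + 1 else acc) (0:Int))
  rcases lt_trichotomy p q with h | h | h
  · rw [if_neg (by omega), if_pos (by omega), if_neg (by omega), if_pos (by omega)]
  · rw [if_neg (by omega), if_neg (by omega), if_neg (by omega), if_neg (by omega)]
  · rw [if_pos (by omega), if_pos (by omega)]
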